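-- pv_equiv track=rewrite | github.com/dwslab/kgreat | util.py | get_one_task_id_per_task_type
-- ===== SOURCE A (Python) =====
-- from typing import Optional, List
--
-- def get_one_task_id_per_task_type(task_config: dict) -> List[str]:
--     task_ids = []
--     known_task_types = set()
--     for task_id, task_entry in task_config.items():
--         task_type = task_entry['type']
--         if task_type not in known_task_types:
--             task_ids.append(task_id)
--             known_task_types.add(task_type)
--     return task_ids
-- ===== SOURCE B (Python) =====
-- from typing import Optional, List
--
-- def get_one_task_id_per_task_type(task_config: dict) -> List[str]:
--     items = list(task_config.items())
--     return [task_id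
--             for i, (task_id, task_entry) in enumerate(items)
--             if all(prev_entry['type'] != task_entry['type']
--                    for _, prev_entry in items[:i])]
-- ===== Notes on version B (the rewrite author's own statement) =====
-- stated objective: alternative
-- what changed: Replaces the stateful single pass with a seen-types set by a stateless quadratic comprehension: keep entry i iff no earlier entry in items[:i] has the same type (first-occurrence check by rescanning the prefix, no accumulator).
import Mathlib
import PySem

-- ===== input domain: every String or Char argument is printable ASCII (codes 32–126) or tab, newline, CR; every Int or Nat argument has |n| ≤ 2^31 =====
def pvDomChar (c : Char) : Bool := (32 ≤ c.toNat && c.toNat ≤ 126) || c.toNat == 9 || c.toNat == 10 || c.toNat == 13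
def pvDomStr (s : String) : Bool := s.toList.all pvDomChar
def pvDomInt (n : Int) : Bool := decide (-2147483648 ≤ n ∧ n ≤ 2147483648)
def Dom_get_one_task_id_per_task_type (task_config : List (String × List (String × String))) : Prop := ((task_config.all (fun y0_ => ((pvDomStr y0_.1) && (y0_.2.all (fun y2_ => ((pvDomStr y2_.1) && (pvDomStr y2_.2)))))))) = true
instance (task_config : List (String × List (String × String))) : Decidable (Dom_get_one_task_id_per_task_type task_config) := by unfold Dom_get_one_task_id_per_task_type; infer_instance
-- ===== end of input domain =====

-- B drops A's accumulated seen-types set: it keeps entry i iff no earlier entry in items[:i]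
-- has the same type (a stateless quadratic prefix rescan; alternative, not faster).

-- ===== PORT A =====
-- task_entry['type'] is ported as getD with default ""; Pre_ guarantees the key is present,
-- so the default is never used on admitted inputs (Python raises KeyError when absent).
def get_one_task_id_per_task_type (task_config : List (String × List (String × String))) : List String :=
  (task_config.foldl
    (fun (st : List String × PySem.Set String) kv =>
      let task_type := (PySem.Dict.mk kv.2).getD "type" ""
      if PySem.Set.contains st.2 task_type then st
      else (st.1 ++ [kv.1], PySem.Set.add st.2 task_type))
    ([], PySem.Set.empty)).1

-- ===== PORT B =====
def get_one_task_id_per_task_type_alt (task_config : List (String × List (String × String))) : List String :=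
  let items := task_config
  ((PySem.List.enumerate items 0).filter
    (fun p => (PySem.List.slice items none (some p.1)).all
      (fun prev => !((PySem.Dict.mk prev.2).getD "type" "" == (PySem.Dict.mk p.2.2).getD "type" "")))).map
    (fun p => p.2.1)

-- ===== PRECONDITION & SPEC =====
-- Pre_ excludes inputs where some entry lacks the 'type' key, on which Python A raises KeyError.
def Pre_get_one_task_id_per_task_type (task_config : List (String × List (String × String))) : Prop :=
  ∀ e ∈ task_config, (PySem.Dict.mk e.2).contains "type" = true
instance (task_config : List (String × List (String × String))) : Decidable (Pre_get_one_task_id_per_task_type task_config) := by unfold Pre_get_one_task_id_per_task_type; infer_instance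

def pvWitness_get_one_task_id_per_task_type : (List (String × List (String × String))) :=
  [("t1", [("type", "x")]), ("t2", [("type", "y")]), ("t3", [("type", "x")])]

def Spec_get_one_task_id_per_task_type (task_config : List (String × List (String × String))) (out : List String) : Prop := out = get_one_task_id_per_task_type_alt task_config
instance (task_config : List (String × List (String × String))) (out : List String) : Decidable (Spec_get_one_task_id_per_task_type task_config out) := by unfold Spec_get_one_task_id_per_task_type; infer_instance

-- ===== CLAIM (what is proved, stated in full; the proofs are below) =====
def Claim_equal_get_one_task_id_per_task_type : Prop := ∀ (task_config : List (String × List (String × String))), Dom_get_one_task_id_per_task_type task_config → Pre_get_one_task_id_per_task_type task_config → Spec_get_one_task_id_per_task_type task_config (get_one_task_id_per_task_type task_config)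

-- ===== LEMMAS AND PROOFS =====

-- the type of an entry, as both ports compute it
def pvTyp (kv : String × List (String × String)) : String := (PySem.Dict.mk kv.2).getD "type" ""

-- reference recursion: keep an entry iff its type is not in `seen`, always appending its type
def pvSel (seen : List String) : List (String × List (String × String)) → List String
  | [] => []
  | kv :: rest =>
    if pvTyp kv ∈ seen then pvSel (seen ++ [pvTyp kv]) rest
    else kv.1 :: pvSel (seen ++ [pvTyp kv]) rest

-- pvSel depends on `seen` only through membership
theorem pvSel_congr (cfg : List (String × List (String × String))) :
    ∀ s1 s2 : List String, (∀ t, t ∈ s1 ↔ t ∈ s2) → pvSel s1 cfg = pvSel s2 cfg := by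
  induction cfg with
  | nil => intro _ _ _; rfl
  | cons kv rest ih =>
    intro s1 s2 h
    have h' : ∀ t, t ∈ s1 ++ [pvTyp kv] ↔ t ∈ s2 ++ [pvTyp kv] := by
      intro t; simp [h t]
    by_cases hm : pvTyp kv ∈ s1
    · simp [pvSel, hm, (h _).1 hm, ih _ _ h']
    · have hm2 : pvTyp kv ∉ s2 := fun c => hm ((h _).2 c)
      simp [pvSel, hm, hm2, ih _ _ h']

-- A's fold computes pvSel (up to the unchanged `seen` on a duplicate, handled by congr)
theorem pvA_fold (cfg : List (String × List (String × String))) :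
    ∀ (acc : List String) (seen : PySem.Set String),
    (cfg.foldl
      (fun (st : List String × PySem.Set String) kv =>
        let task_type := (PySem.Dict.mk kv.2).getD "type" ""
        if PySem.Set.contains st.2 task_type then st
        else (st.1 ++ [kv.1], PySem.Set.add st.2 task_type))
      (acc, seen)).1 = acc ++ pvSel seen cfg := by
  induction cfg with
  | nil => intro acc seen; simp [pvSel]
  | cons kv rest ih =>
    intro acc seen
    rw [List.foldl_cons]
    by_cases hm : pvTyp kv ∈ seen
    · have hc : PySem.Set.contains seen (pvTyp kv) = true := by
        rw [PySem.Set.contains_iff]; exact hm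
      have hmem : ∀ t, t ∈ (seen ++ [pvTyp kv]) ↔ t ∈ seen := by
        intro t
        constructor
        · intro ht
          rcases List.mem_append.1 ht with ht | ht
          · exact ht
          · have : t = pvTyp kv := by simpa using ht
            exact this ▸ hm
        · intro ht; exact List.mem_append_left _ ht
      have hcongr := pvSel_congr rest (seen ++ [pvTyp kv]) seen hmem
      have hstep : (let task_type := (PySem.Dict.mk kv.2).getD "type" ""
          if PySem.Set.contains (Prod.snd (α := List String) (acc, seen)) task_type then ((acc, seen) : List String × PySem.Set String)
          else ((acc, seen).1 ++ [kv.1], PySem.Set.add (acc, seen).2 task_type)) = ((acc, seen) : List String × PySem.Set String) := by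
        simp only [pvTyp] at hc
        simp only [hc]
        rfl
      rw [hstep, ih]
      simp [pvSel, hm, hcongr]
    · have hc : PySem.Set.contains seen (pvTyp kv) = false := by
        rw [Bool.eq_false_iff]
        intro hcc
        exact hm ((PySem.Set.contains_iff _ _).1 hcc)
      have hadd : PySem.Set.add seen (pvTyp kv) = seen ++ [pvTyp kv] :=
        PySem.Set.add_of_not_mem hm
      have hstep : (let task_type := (PySem.Dict.mk kv.2).getD "type" ""
          if PySem.Set.contains (Prod.snd (α := List String) (acc, seen)) task_type then ((acc, seen) : List String × PySem.Set String)
          else ((acc, seen).1 ++ [kv.1], PySem.Set.add (acc, seen).2 task_type)) = (acc ++ [kv.1], seen ++ [pvTyp kv]) := by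
        simp only [pvTyp] at hc hadd
        simp only [hc, hadd]
        rfl
      rw [hstep, ih]
      simp [pvSel, hm]

-- B's filtered enumeration over the suffix computes pvSel of the prefix's types
theorem pvB_filter (cfg : List (String × List (String × String))) :
    ∀ pre : List (String × List (String × String)),
    ((PySem.List.enumerate cfg (pre.length : Int)).filter
      (fun p => (PySem.List.slice (pre ++ cfg) none (some p.1)).all
        (fun prev => !((PySem.Dict.mk prev.2).getD "type" "" == (PySem.Dict.mk p.2.2).getD "type" "")))).map
      (fun p => p.2.1) = pvSel (pre.map pvTyp) cfg := by
  induction cfg with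
  | nil => intro pre; simp [pvSel, PySem.List.enumerate_nil]
  | cons kv rest ih =>
    intro pre
    rw [PySem.List.enumerate_cons]
    have hslice : PySem.List.slice (pre ++ kv :: rest) none (some (pre.length : Int)) = pre := by
      rw [PySem.List.slice_to_natCast]; simp
    have hcond :
        ((PySem.List.slice (pre ++ kv :: rest) none (some ((pre.length : Int), kv).1)).all
          (fun prev => !((PySem.Dict.mk prev.2).getD "type" "" == (PySem.Dict.mk ((pre.length : Int), kv).2.2).getD "type" "")))
        = (pre.map pvTyp).all (fun t => !(t == pvTyp kv)) := by
      simp only [hslice, List.all_map, Function.comp_def, pvTyp]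
    have hstep : (pre ++ [kv]) ++ rest = pre ++ kv :: rest := by simp
    have hlen : ((pre.length : Int) + 1) = (((pre ++ [kv]).length : Int)) := by simp
    have htail := ih (pre ++ [kv])
    rw [hstep] at htail
    rw [← hlen] at htail
    by_cases hm : pvTyp kv ∈ pre.map pvTyp
    · have hall : (pre.map pvTyp).all (fun t => !(t == pvTyp kv)) = false :=
        List.all_eq_false.2 ⟨pvTyp kv, hm, by simp⟩
      rw [List.filter_cons, hcond, hall]
      simp only [Bool.false_eq_true, if_false]
      rw [htail]
      simp [pvSel, hm]
    · have hall : (pre.map pvTyp).all (fun t => !(t == pvTyp kv)) = true := by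
        refine List.all_eq_true.2 ?_
        intro t ht
        simp only [Bool.not_eq_eq_eq_not, Bool.not_true, beq_eq_false_iff_ne, ne_eq]
        intro h; exact hm (h ▸ ht)
      rw [List.filter_cons, hcond, hall]
      simp only [if_true, List.map_cons]
      rw [htail]
      simp [pvSel, hm]

-- ===== VERDICT (by name: the statement is the Claim_ definition above) =====
theorem get_one_task_id_per_task_type_spec : Claim_equal_get_one_task_id_per_task_type := by
  intro cfg _ _
  unfold Spec_get_one_task_id_per_task_type get_one_task_id_per_task_type get_one_task_id_per_task_type_alt
  have hA := pvA_fold cfg [] PySem.Set.empty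
  have hB := pvB_filter cfg []
  simp only [List.length_nil, Int.natCast_zero, List.nil_append, List.map_nil] at hB
  rw [hA]
  simp only [List.nil_append]
  exact hB.symm
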